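-- pv_equiv track=rewrite | github.com/alexander-hamme/Coding-Challenges | EasyChallenges/MinimalOperations/solution.py | minimalOperations
-- ===== SOURCE A (Python) =====
-- def getRepeats(word):
--     return [i for i in range(len(word)-1) if word[i] == word[i+1]]
--
-- def minimalOperations(words):
--     # Write your code here
--     operations = []
--
--     for word in words:
--
--         # if the number of unique characters in the word
--         # is equal to its length, there are no repetitions
--         if len(set(word)) == len(word):
--             operations.append(0)
--
--         else:
--             # each integer in this list is a list index
--             # where word[i] == word[i+1]
--             repeatIdxs = getRepeats(word)   # O(n).  String is never accessed again after this call.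
--
--             # if there is only one repetition, only one change is required
--             if len(repeatIdxs) == 1:
--                 operations.append(1)
--                 continue
--
--             # if there is more than one repetition, more changes will be required
--             curr = 0         # current index in the list of repetition indices
--             numbChanges = 0
--
--             while(curr < len(repeatIdxs)):
--
--                 # last element in array
--                 if (curr == len(repeatIdxs) - 1):
--                     numbChanges += 1
--                     break
--
--                 # if the current repeat was only two letters long,
--                 # then repeatIdxs[curr] will not be 1 less than repeatIdxs[curr+1]
--                 # therefore, only one change is required
--                 elif (repeatIdxs[curr] + 1 != repeatIdxs[curr+1]):
--                     numbChanges += 1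
--
--                 # the current repetition spans more than 2 letters,
--                 # so the number of adjacent letters is counted, and
--                 # then divided by two and floored, which gives
--                 # the number of changes required.
--                 else:
--
--                     numbAdjacent = 2  # we already know at least 2 matching letters are adjacent
--
--                     # counts the number of sequential indices in repeatIdxs
--                     # starting from curr. This corresponds to the number of
--                     # repeated letters.
--                     while (repeatIdxs[curr] + 1 == repeatIdxs[curr+1]):
--
--                         numbAdjacent += 1
--                         curr += 1
--
--                         if (curr >= len(repeatIdxs)-1):  # failsafe
--                             break
--
--                     # number of changes required is half the number of repeated letters, floored.
--                     # e.g. 7 adjacent letters requires 7 // 2 = 3 changes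
--                     numbChanges += numbAdjacent // 2
--
--                 curr += 1  # move ahead to next number in repeatIdxs
--
--             operations.append(numbChanges)
--
--     return operations
-- ===== SOURCE B (Python) =====
-- def minimalOperations(words):
--     res = []
--     for word in words:
--         total = 0
--         run = 1
--         for prev, cur in zip(word, word[1:]):
--             if cur == prev:
--                 run += 1
--             else:
--                 total += run // 2
--                 run = 1
--         total += run // 2
--         res.append(total)
--     return res
-- ===== Notes on version B (the rewrite author's own statement) =====
-- stated objective: simpler
-- what changed: Replaces the repeat-index list, the set-based early exit and the nested index-walking while loops with a single left-to-right pass per word that tracks the current run length and adds run//2 at each run boundary.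
import Mathlib
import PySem

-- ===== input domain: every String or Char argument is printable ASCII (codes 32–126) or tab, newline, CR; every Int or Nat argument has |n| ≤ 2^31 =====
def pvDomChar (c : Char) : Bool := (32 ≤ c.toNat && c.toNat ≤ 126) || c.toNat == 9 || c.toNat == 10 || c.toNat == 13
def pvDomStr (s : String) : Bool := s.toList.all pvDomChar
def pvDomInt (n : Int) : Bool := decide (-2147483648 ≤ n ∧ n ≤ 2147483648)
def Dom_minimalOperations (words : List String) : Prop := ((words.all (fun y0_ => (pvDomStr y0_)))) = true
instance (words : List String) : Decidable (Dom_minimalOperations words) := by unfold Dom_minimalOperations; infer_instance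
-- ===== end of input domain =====

-- B replaces A's repeat-index list, set-based early exit and nested index-walking
-- while loops by a single per-word pass that tracks the current run length and adds
-- run // 2 at each run boundary (objective: simpler).

-- ===== PORT A =====

-- [i for i in range(len(word)-1) if word[i] == word[i+1]]
def getRepeats (word : String) : List Int :=
  (PySem.List.pyRange 0 (PySem.Str.len word - 1) 1).filter
    (fun i => PySem.Str.pyGet? word i == PySem.Str.pyGet? word (i + 1))

-- the inner 'while (repeatIdxs[curr] + 1 == repeatIdxs[curr+1])' loop with its failsafe;
-- returns the final (curr, numbAdjacent).  All index accesses are in range whenever the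
-- loop is reached from the outer loop, so pyGetD's default is never consulted.
def aInner (r : List Int) (fuel : Nat) (curr numbAdjacent : Int) : Int × Int :=
  match fuel with
  | 0 => (curr, numbAdjacent)
  | fuel + 1 =>
    if PySem.List.pyGetD r curr 0 + 1 = PySem.List.pyGetD r (curr + 1) 0 then
      let numbAdjacent := numbAdjacent + 1
      let curr := curr + 1
      if PySem.List.len r - 1 ≤ curr then (curr, numbAdjacent)   -- failsafe break
      else aInner r fuel curr numbAdjacent
    else (curr, numbAdjacent)

-- the outer 'while (curr < len(repeatIdxs))' loop; curr strictly increases, so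
-- fuel = len(repeatIdxs) + 1 suffices
def aOuter (r : List Int) (fuel : Nat) (curr numbChanges : Int) : Int :=
  match fuel with
  | 0 => numbChanges
  | fuel + 1 =>
    if curr < PySem.List.len r then
      if curr = PySem.List.len r - 1 then numbChanges + 1         -- last element: break
      else if PySem.List.pyGetD r curr 0 + 1 ≠ PySem.List.pyGetD r (curr + 1) 0 then
        aOuter r fuel (curr + 1) (numbChanges + 1)
      else
        let p := aInner r r.length curr 2                          -- numbAdjacent starts at 2
        aOuter r fuel (p.1 + 1) (numbChanges + PySem.Int.floordiv p.2 2)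
    else numbChanges

-- one iteration of A's 'for word in words' body
def aWord (word : String) : Int :=
  if PySem.Set.len (PySem.Set.ofList word.toList) = PySem.Str.len word then 0
  else
    let repeatIdxs := getRepeats word
    if PySem.List.len repeatIdxs = 1 then 1
    else aOuter repeatIdxs (repeatIdxs.length + 1) 0 0

def minimalOperations (words : List String) : List Int :=
  words.map aWord

-- ===== PORT B =====

-- state (total, run); one step per adjacent pair (prev, cur) from zip(word, word[1:])
def bStep (s : Int × Int) (pc : Char × Char) : Int × Int :=
  if pc.2 = pc.1 then (s.1, s.2 + 1) else (s.1 + PySem.Int.floordiv s.2 2, 1)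

def bWord (word : String) : Int :=
  let cs := word.toList
  let s := (cs.zip (cs.drop 1)).foldl bStep (0, 1)   -- word[1:] = drop 1 (exact, nonneg index)
  s.1 + PySem.Int.floordiv s.2 2

def minimalOperations_alt (words : List String) : List Int :=
  words.map bWord

-- ===== PRECONDITION & SPEC =====
def Spec_minimalOperations (words : List String) (out : List Int) : Prop := out = minimalOperations_alt words
instance (words : List String) (out : List Int) : Decidable (Spec_minimalOperations words out) := by unfold Spec_minimalOperations; infer_instance

-- ===== CLAIM (what is proved, stated in full; the proofs are below) =====
def Claim_equal_minimalOperations : Prop := ∀ (words : List String), Dom_minimalOperations words → Spec_minimalOperations words (minimalOperations words)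

-- ===== LEMMAS AND PROOFS =====

-- recursive characterisation of getRepeats on the character list
def repRec : List Char → List Int
  | [] => []
  | [_] => []
  | c :: d :: t => (if c = d then [(0 : Int)] else []) ++ (repRec (d :: t)).map (· + 1)

-- length of the leading maximal block of +1-consecutive values starting at x, and the rest
def run1 (x : Int) : List Int → Nat × List Int
  | [] => (1, [])
  | y :: ys => if y = x + 1 then let p := run1 (x + 1) ys; (p.1 + 1, p.2) else (1, y :: ys)

lemma run1_fst_pos (ys : List Int) : ∀ x, 1 ≤ (run1 x ys).1 := by
  induction ys with
  | nil => intro x; simp [run1]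
  | cons y ys ih => intro x; simp only [run1]; split <;> simp

lemma run1_fst_le (ys : List Int) : ∀ x, (run1 x ys).1 ≤ ys.length + 1 := by
  induction ys with
  | nil => intro x; simp [run1]
  | cons y ys ih =>
    intro x; simp only [run1]; split
    · have := ih (x + 1); simpa using this
    · simp

lemma run1_snd_eq_drop (ys : List Int) : ∀ x, (run1 x ys).2 = ys.drop ((run1 x ys).1 - 1) := by
  induction ys with
  | nil => intro x; simp [run1]
  | cons y ys ih =>
    intro x; simp only [run1]; split
    · have h1 := run1_fst_pos ys (x + 1)
      have h2 := ih (x + 1)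
      obtain ⟨m, hm⟩ : ∃ m, (run1 (x + 1) ys).1 = m + 1 := ⟨_, (Nat.succ_pred_eq_of_pos h1).symm⟩
      simp [hm] at h2 ⊢
      exact h2
    · simp

lemma run1_snd_length (x : Int) (ys : List Int) : (run1 x ys).2.length ≤ ys.length := by
  rw [run1_snd_eq_drop]; simp

-- common specification: sum over maximal +1-consecutive blocks of (blocklen + 1) // 2
def blockSum : List Int → Int
  | [] => 0
  | x :: xs =>
      let p := run1 x xs
      PySem.Int.floordiv ((p.1 : Int) + 1) 2 + blockSum p.2
termination_by l => l.length
decreasing_by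
  simpa using Nat.lt_succ_of_le (run1_snd_length x xs)

lemma run1_shift (ys : List Int) : ∀ x s,
    run1 (x + s) (ys.map (· + s)) = ((run1 x ys).1, (run1 x ys).2.map (· + s)) := by
  induction ys with
  | nil => intro x s; simp [run1]
  | cons y ys ih =>
    intro x s
    simp only [List.map_cons, run1]
    split_ifs with h1 h2 h2
    · rw [show x + s + 1 = (x + 1) + s by ring, ih (x + 1) s]
    · omega
    · omega
    · simp

lemma blockSum_map_add (r : List Int) (s : Int) : blockSum (r.map (· + s)) = blockSum r := by
  cases r with
  | nil => simp
  | cons x xs =>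
    simp only [List.map_cons, blockSum]
    have hx : x + s = x + s := rfl
    rw [run1_shift xs x s]
    have := blockSum_map_add (run1 x xs).2 s
    simp [this]
termination_by r.length
decreasing_by
  simpa using Nat.lt_succ_of_le (run1_snd_length x xs)

lemma run1_chain (m : Nat) : ∀ (x : Int) (s : List Int),
    (∀ y, s.head? = some y → y ≠ x + m + 1) →
    run1 x ((List.range m).map (fun i : Nat => x + 1 + (i : Int)) ++ s) = (m + 1, s) := by
  induction m with
  | zero =>
    intro x s hs
    cases s with
    | nil => simp [run1]
    | cons y t =>
      have : y ≠ x + 1 := by have := hs y rfl; omega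
      simp [run1, this]
  | succ m ih =>
    intro x s hs
    rw [List.range_succ_eq_map, List.map_cons, List.map_map]
    have hfun : ((fun i : Nat => x + 1 + (i : Int)) ∘ Nat.succ) = (fun i : Nat => (x + 1) + 1 + (i : Int)) := by
      funext i; simp [Function.comp]; ring
    rw [hfun]
    simp only [List.cons_append, run1, Nat.cast_zero, add_zero]
    have hs' : ∀ y, s.head? = some y → y ≠ (x + 1) + m + 1 := by
      intro y hy; have := hs y hy; push_cast at this ⊢; omega
    rw [ih (x + 1) s hs']
    simp

lemma blockSum_range_append (m : Nat) (s : List Int) (hm : 1 ≤ m)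
    (hs : ∀ y, s.head? = some y → y ≠ (m : Int)) :
    blockSum ((List.range m).map (fun i : Nat => (i : Int)) ++ s)
      = PySem.Int.floordiv ((m : Int) + 1) 2 + blockSum s := by
  obtain ⟨n, rfl⟩ : ∃ n, m = n + 1 := ⟨m - 1, by omega⟩
  rw [List.range_succ_eq_map, List.map_cons, List.map_map]
  have hfun : ((fun i : Nat => (i : Int)) ∘ Nat.succ) = (fun i : Nat => (0 : Int) + 1 + (i : Int)) := by
    funext i; simp [Function.comp]; ring
  rw [hfun]
  simp only [List.cons_append, blockSum, Nat.cast_zero]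
  have hs' : ∀ y, s.head? = some y → y ≠ 0 + (n : Int) + 1 := by
    intro y hy; have := hs y hy; push_cast at this ⊢; omega
  rw [run1_chain n 0 s hs']

lemma repRec_nonneg : ∀ (l : List Char), ∀ y ∈ repRec l, 0 ≤ y
  | [] => by simp [repRec]
  | [_] => by simp [repRec]
  | c :: d :: t => by
    intro y hy
    simp only [repRec, List.mem_append, List.mem_map] at hy
    rcases hy with hy | ⟨z, hz, rfl⟩
    · split at hy <;> simp_all
    · have := repRec_nonneg (d :: t) z hz; omega

lemma repRec_nodup : ∀ (l : List Char), l.Nodup → repRec l = []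
  | [] => by simp [repRec]
  | [_] => by simp [repRec]
  | c :: d :: t => by
    intro h
    have hcd : c ≠ d := by simp [List.nodup_cons] at h; tauto
    have ht : (d :: t).Nodup := h.of_cons
    simp [repRec, hcd, repRec_nodup (d :: t) ht]

lemma repRec_replicate : ∀ (k : Nat) (c : Char) (t : List Char), 1 ≤ k →
    (∀ d, t.head? = some d → d ≠ c) →
    repRec (List.replicate k c ++ t)
      = (List.range (k - 1)).map (fun i : Nat => (i : Int)) ++ (repRec t).map (· + (k : Int)) := by
  intro k
  induction k with
  | zero => omega
  | succ k ih =>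
    intro c t _ ht
    cases Nat.eq_zero_or_pos k with
    | inl hk0 =>
      subst hk0
      cases t with
      | nil => simp [repRec]
      | cons d t' =>
        have hdc : d ≠ c := ht d rfl
        have : c ≠ d := fun h => hdc h.symm
        simp [repRec, this]
    | inr hk1 =>
      obtain ⟨k', rfl⟩ : ∃ k', k = k' + 1 := ⟨k - 1, by omega⟩
      have hstep : List.replicate (k' + 1 + 1) c ++ t = c :: c :: (List.replicate k' c ++ t) := by
        simp [List.replicate_succ]
      rw [hstep]
      have hrec : repRec (c :: c :: (List.replicate k' c ++ t))
          = [(0 : Int)] ++ (repRec (c :: (List.replicate k' c ++ t))).map (· + 1) := by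
        simp [repRec]
      rw [hrec]
      have h2 : c :: (List.replicate k' c ++ t) = List.replicate (k' + 1) c ++ t := by
        simp [List.replicate_succ]
      rw [h2, ih c t (by omega) ht]
      have hR : List.map (fun i : Nat => (i : Int)) (List.range (k' + 1))
          = 0 :: List.map (fun z => z + (1 : Int)) (List.map (fun i : Nat => (i : Int)) (List.range k')) := by
        rw [List.range_succ_eq_map, List.map_cons, List.map_map, List.map_map]
        simp only [Nat.cast_zero, List.cons.injEq, true_and]
        apply List.map_congr_left; intro i _; simp
      have hB : List.map (fun z => z + (1 : Int)) (List.map (· + ((k' + 1 : Nat) : Int)) (repRec t))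
          = List.map (· + ((k' + 1 + 1 : Nat) : Int)) (repRec t) := by
        rw [List.map_map]
        apply List.map_congr_left; intro z _; simp; ring
      simp only [Nat.add_sub_cancel, List.map_append, hR, hB, List.cons_append,
        List.nil_append]

-- bridging getRepeats to repRec
lemma pyGet?_cons_of_nonneg (x : Char) (xs : List Char) (i : Int) (hi : 0 ≤ i) :
    PySem.List.pyGet? (x :: xs) (i + 1) = PySem.List.pyGet? xs i := by
  rw [PySem.List.pyGet?_of_nonneg _ (by omega), PySem.List.pyGet?_of_nonneg _ hi]
  have : (i + 1).toNat = i.toNat + 1 := by omega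
  rw [this]
  simp

lemma listRep_eq_repRec : ∀ (l : List Char),
    (PySem.List.pyRange 0 ((l.length : Int) - 1) 1).filter
      (fun i => PySem.List.pyGet? l i == PySem.List.pyGet? l (i + 1)) = repRec l
  | [] => by simp [repRec]
  | [c] => by simp [repRec]
  | c :: d :: t => by
    have hn : (0 : Int) < ((c :: d :: t).length : Int) - 1 := by
      simp only [List.length_cons]; push_cast; omega
    rw [PySem.List.pyRange_one_cons hn, List.filter_cons]
    have h0 : PySem.List.pyGet? (c :: d :: t) 0 = some c := by
      simp [PySem.List.pyGet?_zero_cons]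
    have h1 : PySem.List.pyGet? (c :: d :: t) (0 + 1) = some d := by
      rw [pyGet?_cons_of_nonneg c (d :: t) 0 le_rfl, PySem.List.pyGet?_zero_cons]
    rw [h0, h1]
    have hrange : PySem.List.pyRange (0 + 1) (((c :: d :: t).length : Int) - 1) 1
        = (PySem.List.pyRange 0 (((d :: t).length : Int) - 1) 1).map (· + 1) := by
      rw [PySem.List.pyRange_one, PySem.List.pyRange_one, List.map_map]
      have : (((c :: d :: t).length : Int) - 1 - (0 + 1)).toNat
           = (((d :: t).length : Int) - 1 - 0).toNat := by
        simp only [List.length_cons]; omega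
      rw [this]
      apply List.map_congr_left; intro i _; simp [Function.comp]; ring
    rw [hrange, List.filter_map]
    have hcong : List.filter ((fun i => PySem.List.pyGet? (c :: d :: t) i == PySem.List.pyGet? (c :: d :: t) (i + 1)) ∘ (· + 1))
          (PySem.List.pyRange 0 (((d :: t).length : Int) - 1) 1)
        = List.filter (fun i => PySem.List.pyGet? (d :: t) i == PySem.List.pyGet? (d :: t) (i + 1))
          (PySem.List.pyRange 0 (((d :: t).length : Int) - 1) 1) := by
      apply List.filter_congr
      intro i hi
      have h0i : 0 ≤ i := (PySem.List.mem_pyRange_one.mp hi).1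
      simp only [Function.comp]
      rw [pyGet?_cons_of_nonneg c (d :: t) i h0i, pyGet?_cons_of_nonneg c (d :: t) (i + 1) (by omega)]
    rw [hcong, listRep_eq_repRec (d :: t)]
    by_cases hcd : c = d
    · simp [repRec, hcd]
    · have : (c == d) = false := by simp [hcd]
      simp [repRec, hcd, this]

lemma getRepeats_eq_repRec (word : String) : getRepeats word = repRec word.toList := by
  rw [← listRep_eq_repRec word.toList]
  simp [getRepeats, PySem.Str.pyGet?, PySem.Str.len_eq]

-- A's inner while loop computes the current block length
lemma inner_spec : ∀ (fuel : Nat) (r : List Int) (j : Nat) (a : Int)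
    (hj : j + 2 ≤ r.length) (_hf : r.length ≤ fuel + j + 1),
    aInner r fuel (j : Int) a
      = ((j : Int) + (((run1 (r[j]'(by omega)) (r.drop (j + 1))).1 - 1 : Nat) : Int),
         a + (((run1 (r[j]'(by omega)) (r.drop (j + 1))).1 - 1 : Nat) : Int)) := by
  intro fuel
  induction fuel with
  | zero => intro r j a hj hf; omega
  | succ fuel ih =>
    intro r j a hj hf
    have hj1 : j + 1 < r.length := by omega
    have hdrop : r.drop (j + 1) = r[j + 1] :: r.drop (j + 2) := List.drop_eq_getElem_cons hj1
    have hg0 : PySem.List.pyGetD r ((j : Int)) 0 = r[j]'(by omega) := by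
      rw [PySem.List.pyGetD_natCast]; exact List.getD_eq_getElem r 0 (by omega)
    have hg1 : PySem.List.pyGetD r ((j : Int) + 1) 0 = r[j + 1] := by
      have : (j : Int) + 1 = ((j + 1 : Nat) : Int) := by push_cast; ring
      rw [this, PySem.List.pyGetD_natCast]; exact List.getD_eq_getElem r 0 hj1
    simp only [aInner, hg0, hg1]
    by_cases hC : r[j]'(by omega) + 1 = r[j + 1]
    · rw [if_pos hC]
      have hrun : (run1 (r[j]'(by omega)) (r.drop (j + 1))).1
          = (run1 (r[j + 1]) (r.drop (j + 2))).1 + 1 := by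
        rw [hdrop]; simp only [run1, if_pos hC.symm]
        rw [← hC]
      by_cases hend : j + 2 = r.length
      · have hfs : PySem.List.len r - 1 ≤ (j : Int) + 1 := by
          rw [PySem.List.len_eq]; omega
        rw [if_pos hfs]
        have hd2 : r.drop (j + 2) = [] := List.drop_eq_nil_of_le (by omega)
        rw [hrun, hd2]
        simp [run1]
      · have hfs : ¬ (PySem.List.len r - 1 ≤ (j : Int) + 1) := by
          rw [PySem.List.len_eq]; omega
        rw [if_neg hfs]
        have hcast : (j : Int) + 1 = ((j + 1 : Nat) : Int) := by push_cast; ring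
        rw [hcast, ih r (j + 1) (a + 1) (by omega) (by omega)]
        have hjj : j + 1 + 1 = j + 2 := by omega
        rw [hjj]
        have hn1 := run1_fst_pos (r.drop (j + 2)) (r[j + 1])
        rw [hrun]
        simp only [Prod.mk.injEq]
        constructor <;> push_cast <;> omega
    · rw [if_neg hC]
      have hrun : (run1 (r[j]'(by omega)) (r.drop (j + 1))).1 = 1 := by
        rw [hdrop]; simp only [run1]
        rw [if_neg (by intro h; exact hC (by omega))]
      rw [hrun]
      simp

-- A's outer while loop computes blockSum of the not-yet-visited suffix
lemma outer_spec : ∀ (fuel : Nat) (r : List Int) (j : Nat) (nc : Int)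
    (_hf : r.length + 1 ≤ fuel + j),
    aOuter r fuel (j : Int) nc = nc + blockSum (r.drop j) := by
  intro fuel
  induction fuel with
  | zero =>
    intro r j nc hf
    have : r.drop j = [] := List.drop_eq_nil_of_le (by omega)
    simp [aOuter, this, blockSum]
  | succ fuel ih =>
    intro r j nc hf
    simp only [aOuter, PySem.List.len_eq]
    by_cases hj : j < r.length
    · rw [if_pos (by exact_mod_cast hj)]
      by_cases hlast : j + 1 = r.length
      · rw [if_pos (by omega)]
        have hdrop : r.drop j = [r[j]'(by omega)] := by
          rw [List.drop_eq_getElem_cons (by omega), List.drop_eq_nil_of_le (by omega)]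
        rw [hdrop]
        have : blockSum [r[j]'(by omega)] = 1 := by
          simp only [blockSum, run1]
          norm_num
        rw [this]
      · rw [if_neg (by omega)]
        have hj2 : j + 2 ≤ r.length := by omega
        have hg0 : PySem.List.pyGetD r ((j : Int)) 0 = r[j]'(by omega) := by
          rw [PySem.List.pyGetD_natCast]; exact List.getD_eq_getElem r 0 (by omega)
        have hg1 : PySem.List.pyGetD r ((j : Int) + 1) 0 = r[j + 1]'(by omega) := by
          have : (j : Int) + 1 = ((j + 1 : Nat) : Int) := by push_cast; ring
          rw [this, PySem.List.pyGetD_natCast]; exact List.getD_eq_getElem r 0 (by omega)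
        rw [hg0, hg1]
        have hdropj : r.drop j = r[j]'(by omega) :: r.drop (j + 1) := List.drop_eq_getElem_cons (by omega)
        have hdropj1 : r.drop (j + 1) = r[j + 1]'(by omega) :: r.drop (j + 2) := List.drop_eq_getElem_cons (by omega)
        by_cases hC : r[j]'(by omega) + 1 = r[j + 1]'(by omega)
        · rw [if_neg (by simpa using hC)]
          rw [inner_spec r.length r j 2 hj2 (by omega)]
          set n := (run1 (r[j]'(by omega)) (r.drop (j + 1))).1 with hn
          have hn2 : 2 ≤ n := by
            rw [hn, hdropj1]; simp only [run1, if_pos hC.symm]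
            have := run1_fst_pos (r.drop (j + 2)) (r[j]'(by omega) + 1)
            omega
          have hnle : n ≤ r.length - j := by
            have := run1_fst_le (r.drop (j + 1)) (r[j]'(by omega))
            simp [List.length_drop] at this
            omega
          have hcast : ((j : Int) + ((n - 1 : Nat) : Int)) + 1 = ((j + n : Nat) : Int) := by
            push_cast; omega
          rw [hcast, ih r (j + n) _ (by omega)]
          have hbs : blockSum (r.drop j) = PySem.Int.floordiv ((n : Int) + 1) 2 + blockSum (r.drop (j + n)) := by
            rw [hdropj]
            simp only [blockSum]
            rw [← hn, run1_snd_eq_drop, ← hn, List.drop_drop]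
            have : j + 1 + (n - 1) = j + n := by omega
            rw [this]
          rw [hbs]
          have h2n : (2 : Int) + ((n - 1 : Nat) : Int) = (n : Int) + 1 := by omega
          rw [h2n]
          ring
        · rw [if_pos (by simpa using hC)]
          have hcast : (j : Int) + 1 = ((j + 1 : Nat) : Int) := by push_cast; ring
          rw [hcast, ih r (j + 1) (nc + 1) (by omega)]
          have hbs : blockSum (r.drop j) = 1 + blockSum (r.drop (j + 1)) := by
            rw [hdropj]
            simp only [blockSum]
            rw [hdropj1]
            simp only [run1]
            rw [if_neg (by intro h; exact hC (by omega))]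
            norm_num
          rw [hbs]; ring
    · rw [if_neg (by exact_mod_cast hj)]
      have : r.drop j = [] := List.drop_eq_nil_of_le (by omega)
      simp [this, blockSum]

lemma aWord_eq_blockSum (word : String) : aWord word = blockSum (repRec word.toList) := by
  unfold aWord
  by_cases h1 : PySem.Set.len (PySem.Set.ofList word.toList) = PySem.Str.len word
  · rw [if_pos h1]
    -- distinct characters ⇒ Nodup ⇒ no repeats
    have hlen : (PySem.Set.ofList word.toList).length = word.toList.length := by
      rw [PySem.Str.len_eq] at h1
      simp [PySem.Set.len] at h1
      exact_mod_cast h1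
    have hperm : (PySem.Set.ofList word.toList).Perm word.toList.dedup := by
      refine (List.perm_ext_iff_of_nodup (PySem.Set.nodup_ofList _) (List.nodup_dedup _)).mpr ?_
      intro a; rw [PySem.Set.mem_ofList, List.mem_dedup]
    have hdl : word.toList.dedup.length = word.toList.length := by
      rw [← hperm.length_eq, hlen]
    have hded : word.toList.dedup = word.toList :=
      (List.dedup_sublist word.toList).eq_of_length_le (by omega)
    have hnd : word.toList.Nodup := List.dedup_eq_self.mp hded
    rw [repRec_nodup _ hnd]
    simp [blockSum]
  · rw [if_neg h1]
    simp only [getRepeats_eq_repRec]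
    by_cases h2 : PySem.List.len (repRec word.toList) = 1
    · rw [if_pos h2]
      rw [PySem.List.len_eq] at h2
      obtain ⟨x, hx⟩ := List.length_eq_one_iff.mp (by exact_mod_cast h2)
      rw [hx]
      simp only [blockSum, run1]
      norm_num
    · rw [if_neg h2]
      have hout := outer_spec ((repRec word.toList).length + 1) (repRec word.toList) 0 0 (by omega)
      simpa using hout

-- ===== B side =====

def bCore (l : List Char) : Int :=
  let s := (l.zip (l.drop 1)).foldl bStep (0, 1)
  s.1 + PySem.Int.floordiv s.2 2

lemma bWord_eq_bCore (word : String) : bWord word = bCore word.toList := rfl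

lemma bRun (m : Nat) : ∀ (c : Char) (s : Int × Int),
    (List.replicate m (c, c)).foldl bStep s = (s.1, s.2 + m) := by
  induction m with
  | zero => intro c s; simp
  | succ m ih =>
    intro c s
    rw [List.replicate_succ, List.foldl_cons]
    have hstep : bStep s (c, c) = (s.1, s.2 + 1) := by simp [bStep]
    rw [hstep, ih]
    push_cast; ring_nf

lemma bShift (zs : List (Char × Char)) : ∀ (a x r : Int),
    zs.foldl bStep (a + x, r) = ((zs.foldl bStep (a, r)).1 + x, (zs.foldl bStep (a, r)).2) := by
  induction zs with
  | nil => intro a x r; simp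
  | cons z zs ih =>
    intro a x r
    simp only [List.foldl_cons, bStep]
    by_cases h : z.2 = z.1
    · rw [if_pos h, if_pos h]; exact ih a x (r + 1)
    · rw [if_neg h, if_neg h]
      have : a + x + PySem.Int.floordiv r 2 = (a + PySem.Int.floordiv r 2) + x := by ring
      rw [this]; exact ih _ x 1

lemma adj_rep (k : Nat) : ∀ (c : Char) (t : List Char),
    (List.replicate (k + 1) c ++ t).zip ((List.replicate (k + 1) c ++ t).drop 1)
      = List.replicate k (c, c) ++ ((c :: t).zip t) := by
  induction k with
  | zero => intro c t; simp
  | succ k ih =>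
    intro c t
    have h1 : List.replicate (k + 1 + 1) c ++ t = c :: (List.replicate (k + 1) c ++ t) := by
      simp [List.replicate_succ]
    rw [h1]
    have h2 : (c :: (List.replicate (k + 1) c ++ t)).drop 1 = List.replicate (k + 1) c ++ t := rfl
    rw [h2]
    have h3 : List.replicate (k + 1) c ++ t = c :: (List.replicate k c ++ t) := by
      simp [List.replicate_succ]
    have h4 : (List.replicate (k + 1) c ++ t).drop 1 = List.replicate k c ++ t := by rw [h3]; rfl
    calc (c :: (List.replicate (k + 1) c ++ t)).zip (List.replicate (k + 1) c ++ t)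
        = (c :: (List.replicate (k + 1) c ++ t)).zip (c :: (List.replicate k c ++ t)) := by
          rw [← h3]
      _ = (c, c) :: (List.replicate (k + 1) c ++ t).zip (List.replicate k c ++ t) := by
          rw [List.zip_cons_cons]
      _ = (c, c) :: (List.replicate (k + 1) c ++ t).zip ((List.replicate (k + 1) c ++ t).drop 1) := by
          rw [h4]
      _ = (c, c) :: (List.replicate k (c, c) ++ (c :: t).zip t) := by rw [ih c t]
      _ = List.replicate (k + 1) (c, c) ++ (c :: t).zip t := by simp [List.replicate_succ]

lemma bCore_peel (k : Nat) (c : Char) (t : List Char) (hk : 1 ≤ k)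
    (ht : ∀ d, t.head? = some d → d ≠ c) :
    bCore (List.replicate k c ++ t) = PySem.Int.floordiv (k : Int) 2 + bCore t := by
  obtain ⟨k', rfl⟩ : ∃ k', k = k' + 1 := ⟨k - 1, by omega⟩
  unfold bCore
  rw [adj_rep k' c t, List.foldl_append, bRun k' c (0, 1)]
  cases t with
  | nil => simp; omega
  | cons d t' =>
    have hdc : d ≠ c := ht d rfl
    have hzip : (c :: d :: t').zip (d :: t') = (c, d) :: ((d :: t').zip t') := by
      rw [List.zip_cons_cons]
    rw [hzip, List.foldl_cons]
    have hstep : bStep (0, 1 + (k' : Int)) (c, d) = ((0 : Int) + PySem.Int.floordiv ((k' : Int) + 1) 2, 1) := by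
      simp only [bStep]
      rw [if_neg (by simpa using hdc)]
      rw [show (1 + (k' : Int)) = (k' : Int) + 1 from by ring]
    rw [hstep, bShift]
    simp only [List.drop_succ_cons, List.drop_zero]
    push_cast
    ring

lemma head?_dropWhile_prop {α : Type} (p : α → Bool) (l : List α) (y : α)
    (h : (l.dropWhile p).head? = some y) : p y = false := by
  induction l with
  | nil => simp at h
  | cons a l ih =>
    rw [List.dropWhile_cons] at h
    split at h
    · exact ih h
    · next hpa => simp at h; rw [← h]; simpa using hpa

-- run decomposition: peel off the first maximal run of equal characters
lemma run_decomp (c : Char) (t0 : List Char) :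
    ∃ k t, 1 ≤ k ∧ (∀ d, t.head? = some d → d ≠ c) ∧ List.replicate k c ++ t = c :: t0 := by
  refine ⟨((c :: t0).takeWhile (fun d => d == c)).length, (c :: t0).dropWhile (fun d => d == c),
    ?_, ?_, ?_⟩
  · rw [List.takeWhile_cons_of_pos (by simp)]
    simp
  · intro d hd
    have := head?_dropWhile_prop (fun d => d == c) (c :: t0) d hd
    simpa using this
  · have htake : (c :: t0).takeWhile (fun d => d == c)
        = List.replicate ((c :: t0).takeWhile (fun d => d == c)).length c := by
      rw [List.eq_replicate_iff]
      exact ⟨rfl, fun b hb => by simpa using List.mem_takeWhile_imp hb⟩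
    rw [← htake, List.takeWhile_append_dropWhile]

lemma core_eq (l : List Char) : bCore l = blockSum (repRec l) := by
  cases hl : l with
  | nil => simp [bCore, repRec, blockSum]
  | cons c t0 =>
    obtain ⟨k, t, hk1, ht, hdec⟩ := run_decomp c t0
    have hlt : t.length < (c :: t0).length := by
      have hlen := congrArg List.length hdec
      rw [List.length_append, List.length_replicate] at hlen
      simp only [List.length_cons] at hlen ⊢
      omega
    have hrec : bCore t = blockSum (repRec t) := core_eq t
    rw [← hdec, bCore_peel k c t hk1 ht, repRec_replicate k c t hk1 ht]
    cases Nat.lt_or_ge k 2 with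
    | inl hk2 =>
      have hk : k = 1 := by omega
      subst hk
      simp only [Nat.sub_self, List.range_zero, List.map_nil, List.nil_append, Nat.cast_one]
      rw [blockSum_map_add, hrec]
      norm_num
    | inr hk2 =>
      have hm : 1 ≤ k - 1 := by omega
      rw [blockSum_range_append (k - 1) _ hm ?hs]
      · rw [blockSum_map_add, hrec]
        have : ((k - 1 : Nat) : Int) + 1 = (k : Int) := by omega
        rw [this]
      case hs =>
        intro y hy
        rw [List.head?_map] at hy
        cases hhead : (repRec t).head? with
        | none => rw [hhead] at hy; simp at hy
        | some z =>
          rw [hhead] at hy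
          simp at hy
          have hz : z ∈ repRec t := List.mem_of_mem_head? hhead
          have := repRec_nonneg t z hz
          omega
termination_by l.length
decreasing_by
  exact hlt

-- ===== VERDICT (by name: the statement is the Claim_ definition above) =====
theorem minimalOperations_spec : Claim_equal_minimalOperations := by
  intro words _
  unfold Spec_minimalOperations minimalOperations minimalOperations_alt
  apply List.map_congr_left
  intro w _
  rw [aWord_eq_blockSum, bWord_eq_bCore, core_eq]
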